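-- pv_equiv track=rewrite | github.com/hotbreakb/Cooking | programmers/hotbreakb/level2/기능개발.py | solution
-- ===== SOURCE A (Python) =====
-- def solution(progresses, speeds):
--     answer = []
--     days = list(map(lambda item: (100-item[0])//item[1] if (
--         100-item[0]) % item[1] == 0 else (100-item[0])//item[1]+1, zip(progresses, speeds)))
--
--     i, uploaded = 0, 1
--     while i < len(days):
--         for j in range(i+1, len(days)):
--             if days[i] >= days[j]:
--                 uploaded += 1
--             else:
--                 break
--
--         answer.append(uploaded)
--         i += uploaded
--         uploaded = 1
--     return answer
-- ===== SOURCE B (Python) =====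
-- def solution(progresses, speeds):
--     # Each task's actual release day is the running maximum of the required days
--     # (ceil((100-p)/s) computed as -((p-100)//s)); group sizes are the run lengths
--     # of equal consecutive release days.
--     release = []
--     m = None
--     for p, s in zip(progresses, speeds):
--         d = -((p - 100) // s)
--         if m is None or d > m:
--             m = d
--         release.append(m)
--     answer = []
--     for k in range(len(release)):
--         if k and release[k] == release[k - 1]:
--             answer[-1] += 1
--         else:
--             answer.append(1)
--     return answer
-- ===== Notes on version B (the rewrite author's own statement) =====
-- stated objective: alternative
-- what changed: Instead of A's grouping scan with an index-jumping while-loop and inner for/break, B first computes each task's actual release day as the running maximum of its required days (ceil done as -((p-100)//s)) and then run-length-encodes that nondecreasing list by incrementing answer[-1] on equal consecutive values.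
import Mathlib
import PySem

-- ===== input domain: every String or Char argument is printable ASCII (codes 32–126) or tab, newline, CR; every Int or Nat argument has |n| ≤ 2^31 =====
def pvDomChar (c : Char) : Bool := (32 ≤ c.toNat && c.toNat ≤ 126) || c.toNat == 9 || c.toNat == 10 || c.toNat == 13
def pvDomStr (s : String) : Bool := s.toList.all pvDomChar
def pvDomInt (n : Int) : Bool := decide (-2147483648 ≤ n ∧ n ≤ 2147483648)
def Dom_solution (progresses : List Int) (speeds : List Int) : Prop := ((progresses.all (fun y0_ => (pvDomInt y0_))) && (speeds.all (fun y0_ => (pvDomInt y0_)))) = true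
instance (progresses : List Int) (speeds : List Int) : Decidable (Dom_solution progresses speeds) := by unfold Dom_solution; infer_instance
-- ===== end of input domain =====

-- B recasts the problem: instead of A's index-jumping group scan, it computes each task's
-- actual release day (the running maximum of the required days) and run-length-encodes the
-- resulting nondecreasing list (objective: alternative).

-- ===== PORT A =====
-- A's inner 'for j in range(i+1, len(days)): if days[i] >= days[j]: uploaded += 1 else: break'
-- (days[i] is fixed throughout the inner loop; it is passed as 'leader')
def aInner (days : List Int) (leader : Int) (j : Nat) (uploaded : Int) : Int :=
  if _ : j < days.length then
    if leader ≥ days[j]! then aInner days leader (j + 1) (uploaded + 1) else uploaded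
  else uploaded
termination_by days.length - j

-- needed by aOuter's termination: uploaded never decreases
theorem aInner_ge (days : List Int) (leader : Int) (j : Nat) (uploaded : Int) :
    uploaded ≤ aInner days leader j uploaded := by
  unfold aInner
  split
  · split
    · have := aInner_ge days leader (j + 1) (uploaded + 1); omega
    · omega
  · omega
termination_by days.length - j

-- A's outer 'while i < len(days)' loop
def aOuter (days : List Int) (i : Nat) : List Int :=
  if _ : i < days.length then
    aInner days days[i]! (i + 1) 1 :: aOuter days (i + (aInner days days[i]! (i + 1) 1).toNat)
  else []
termination_by days.length - i
decreasing_by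
  have h1 : (1 : Int) ≤ aInner days days[i]! (i + 1) 1 := aInner_ge days days[i]! (i + 1) 1
  omega

def solution (progresses : List Int) (speeds : List Int) : List Int :=
  let days := (progresses.zip speeds).map (fun item =>
    if PySem.Int.mod (100 - item.1) item.2 = 0 then PySem.Int.floordiv (100 - item.1) item.2
    else PySem.Int.floordiv (100 - item.1) item.2 + 1)
  aOuter days 0

-- ===== PORT B =====
-- B's first loop: release days as the running maximum of -((p-100)//s); m? is the
-- variable m (None before the first iteration)
def relLoop (pairs : List (Int × Int)) (m? : Option Int) : List Int :=
  match pairs with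
  | [] => []
  | (p, s) :: t =>
      let d := -(PySem.Int.floordiv (p - 100) s)
      let m := match m? with
        | none => d
        | some m0 => if d > m0 then d else m0
      m :: relLoop t (some m)

-- B's 'answer[-1] += 1'
def bumpLast (l : List Int) : List Int :=
  match l with
  | [] => []
  | [x] => [x + 1]
  | x :: y :: t => x :: bumpLast (y :: t)

-- B's second loop 'for k in range(len(release))' comparing release[k] with release[k-1];
-- ported structurally, carrying the previous element (none at k = 0) and the answer list
def rleLoop (release : List Int) (prev? : Option Int) (answer : List Int) : List Int :=
  match release with
  | [] => answer
  | r :: t =>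
      match prev? with
      | none => rleLoop t (some r) (answer ++ [1])
      | some prev =>
          if r = prev then rleLoop t (some r) (bumpLast answer)
          else rleLoop t (some r) (answer ++ [1])

def solution_alt (progresses : List Int) (speeds : List Int) : List Int :=
  rleLoop (relLoop (progresses.zip speeds) none) none []

-- ===== PRECONDITION & SPEC =====
-- Pre_ excludes exactly the inputs where Python A raises ZeroDivisionError: a zero speed
-- paired with a progress by zip (B raises there too).
def Pre_solution (progresses : List Int) (speeds : List Int) : Prop :=
  ((progresses.zip speeds).all (fun item => item.2 != 0)) = true
instance (progresses : List Int) (speeds : List Int) : Decidable (Pre_solution progresses speeds) := by unfold Pre_solution; infer_instance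
def pvWitness_solution : List Int × List Int := ([93, 30, 55, 60, 40, 65], [1, 30, 5, 10, 60, 7])

def Spec_solution (progresses : List Int) (speeds : List Int) (out : List Int) : Prop := out = solution_alt progresses speeds
instance (progresses : List Int) (speeds : List Int) (out : List Int) : Decidable (Spec_solution progresses speeds out) := by unfold Spec_solution; infer_instance

-- ===== CLAIM (what is proved, stated in full; the proofs are below) =====
def Claim_equal_solution : Prop := ∀ (progresses : List Int) (speeds : List Int), Dom_solution progresses speeds → Pre_solution progresses speeds → Spec_solution progresses speeds (solution progresses speeds)

-- ===== LEMMAS AND PROOFS =====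

-- common reference: greedy grouping of a deadline list
def grp (l : List Int) : List Int :=
  match l with
  | [] => []
  | d :: t =>
    (1 + ((t.takeWhile (fun x => x ≤ d)).length : Int)) ::
      grp (t.dropWhile (fun x => x ≤ d))
termination_by l.length
decreasing_by simp; exact List.length_dropWhile_le _ _

theorem grp_nil : grp [] = [] := by rw [grp.eq_def]

theorem grp_cons (d : Int) (t : List Int) :
    grp (d :: t) = (1 + ((t.takeWhile (fun x => x ≤ d)).length : Int)) ::
      grp (t.dropWhile (fun x => x ≤ d)) := by
  rw [grp.eq_def]

theorem drop_takeWhile_len (p : Int → Bool) (l : List Int) :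
    l.drop (l.takeWhile p).length = l.dropWhile p := by
  induction l with
  | nil => rfl
  | cons a t ih => by_cases h : p a <;> simp [h, ih]

-- ===== A-side: aOuter computes grp =====
theorem aInner_eq (days : List Int) (leader : Int) (j : Nat) (u : Int) :
    aInner days leader j u =
      u + (((days.drop j).takeWhile (fun x => x ≤ leader)).length : Int) := by
  unfold aInner
  split
  · rename_i h
    have hget : days[j]! = days[j] := by
      simp [List.getElem!_eq_getElem?_getD, List.getElem?_eq_getElem h]
    have hd : days.drop j = days[j] :: days.drop (j + 1) := List.drop_eq_getElem_cons h
    rw [hget, hd]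
    split
    · rename_i hge
      rw [aInner_eq days leader (j + 1) (u + 1),
        List.takeWhile_cons_of_pos (by simpa using hge), List.length_cons]
      push_cast; ring
    · rename_i hge
      rw [List.takeWhile_cons_of_neg (by simpa using hge)]
      simp
  · rename_i h
    rw [List.drop_eq_nil_of_le (by omega)]
    simp
termination_by days.length - j

theorem aOuter_eq (days : List Int) (i : Nat) :
    aOuter days i = grp (days.drop i) := by
  unfold aOuter
  split
  · rename_i h
    have hget : days[i]! = days[i] := by
      simp [List.getElem!_eq_getElem?_getD, List.getElem?_eq_getElem h]
    have hd : days.drop i = days[i] :: days.drop (i + 1) := List.drop_eq_getElem_cons h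
    rw [hget, aInner_eq, hd, grp_cons]
    have htn : ((1 : Int) + (((days.drop (i + 1)).takeWhile (fun x => x ≤ days[i])).length : Int)).toNat
        = 1 + ((days.drop (i + 1)).takeWhile (fun x => x ≤ days[i])).length := by omega
    rw [aOuter_eq days (i + ((1 : Int) + (((days.drop (i + 1)).takeWhile (fun x => x ≤ days[i])).length : Int)).toNat)]
    congr 1
    rw [htn, ← drop_takeWhile_len (fun x => decide (x ≤ days[i])) (days.drop (i + 1)),
      List.drop_drop, ← Nat.add_assoc]
  · rename_i h
    rw [List.drop_eq_nil_of_le (by omega), grp_nil]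
termination_by days.length - i
decreasing_by
  omega

-- ===== ceiling identity: A's day formula equals B's -((p-100)//s) for s ≠ 0 =====
theorem ceil_eq (a s : Int) (hs : s ≠ 0) :
    (if PySem.Int.mod a s = 0 then PySem.Int.floordiv a s else PySem.Int.floordiv a s + 1)
      = -(PySem.Int.floordiv (-a) s) := by
  by_cases h : s ∣ a
  · obtain ⟨k, rfl⟩ := h
    rw [if_pos ((PySem.Int.mod_eq_zero_iff_dvd _ s).mpr ⟨k, rfl⟩)]
    rw [show -(s * k) = s * (-k) by ring]
    simp only [PySem.Int.floordiv, Int.mul_fdiv_cancel_left _ hs]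
    ring
  · rw [if_neg (fun hz => h ((PySem.Int.mod_eq_zero_iff_dvd _ s).mp hz))]
    have h1 := PySem.Int.floordiv_mul_add_mod a s
    have h2 := PySem.Int.floordiv_mul_add_mod (-a) s
    have hr : PySem.Int.mod a s ≠ 0 := fun hz => h ((PySem.Int.mod_eq_zero_iff_dvd _ s).mp hz)
    have hr' : PySem.Int.mod (-a) s ≠ 0 := by
      intro hz
      exact h (Int.dvd_neg.mp ((PySem.Int.mod_eq_zero_iff_dvd _ s).mp hz))
    set q := PySem.Int.floordiv a s
    set q' := PySem.Int.floordiv (-a) s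
    set r := PySem.Int.mod a s
    set r' := PySem.Int.mod (-a) s
    have key : (q + q') * s = -(r + r') := by linarith [h1, h2, add_mul q q' s]
    rcases lt_or_gt_of_ne hs with hneg | hpos
    · have hb1 := PySem.Int.mod_neg_bounds a hneg
      have hb2 := PySem.Int.mod_neg_bounds (-a) hneg
      have hub : (q + q') * s > 0 * s := by rw [key]; simp; omega
      have hlb : (q + q') * s < (-2) * s := by rw [key]; omega
      have t1 : q + q' < 0 := lt_of_mul_lt_mul_of_nonpos_right hub (le_of_lt hneg)
      have t2 : -2 < q + q' := lt_of_mul_lt_mul_of_nonpos_right hlb (le_of_lt hneg)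
      omega
    · have hb1 := And.intro (PySem.Int.mod_nonneg a hpos) (PySem.Int.mod_lt a hpos)
      have hb2 := And.intro (PySem.Int.mod_nonneg (-a) hpos) (PySem.Int.mod_lt (-a) hpos)
      have hub : (q + q') * s < 0 * s := by rw [key]; simp; omega
      have hlb : (-2) * s < (q + q') * s := by rw [key]; omega
      have t1 : q + q' < 0 := lt_of_mul_lt_mul_right hub (le_of_lt hpos)
      have t2 : -2 < q + q' := lt_of_mul_lt_mul_right hlb (le_of_lt hpos)
      omega

-- ===== B-side: relLoop is a running-max scan, rleLoop run-length-encodes it =====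

-- math view of B's first loop once m is set
def scanMaxFrom (m : Int) (l : List Int) : List Int :=
  match l with
  | [] => []
  | d :: t => (if d > m then d else m) :: scanMaxFrom (if d > m then d else m) t

def daysB (item : Int × Int) : Int := -(PySem.Int.floordiv (item.1 - 100) item.2)

theorem relLoop_some (pairs : List (Int × Int)) (m : Int) :
    relLoop pairs (some m) = scanMaxFrom m (pairs.map daysB) := by
  induction pairs generalizing m with
  | nil => rfl
  | cons hd t ih =>
    obtain ⟨p, s⟩ := hd
    simp only [relLoop, List.map_cons, scanMaxFrom, daysB, ih]

theorem bumpLast_append (l : List Int) (c : Int) :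
    bumpLast (l ++ [c]) = l ++ [c + 1] := by
  induction l with
  | nil => rfl
  | cons x t ih =>
    cases t with
    | nil => rfl
    | cons y u => simpa [bumpLast] using ih

theorem rleLoop_scan (t : List Int) (d c : Int) (ans : List Int) :
    rleLoop (scanMaxFrom d t) (some d) (ans ++ [c]) =
      ans ++ ((c + ((t.takeWhile (fun x => x ≤ d)).length : Int)) ::
        grp (t.dropWhile (fun x => x ≤ d))) := by
  induction t generalizing d c ans with
  | nil => simp [scanMaxFrom, rleLoop, grp_nil]
  | cons x u ih =>
    by_cases h : x ≤ d
    · have hm : (if x > d then x else d) = d := by simp [show ¬ x > d by omega]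
      rw [scanMaxFrom, hm, rleLoop, if_pos rfl, bumpLast_append, ih,
        List.takeWhile_cons_of_pos (by simpa using h),
        List.dropWhile_cons_of_pos (by simpa using h), List.length_cons]
      congr 2
      push_cast; ring
    · have hm : (if x > d then x else d) = x := by simp [show x > d by omega]
      rw [scanMaxFrom, hm, rleLoop, if_neg (by omega), ih x 1 (ans ++ [c]),
        List.takeWhile_cons_of_neg (by simpa using h),
        List.dropWhile_cons_of_neg (by simpa using h), grp_cons]
      simp

theorem alt_eq_grp (days : List Int) :
    rleLoop (match days with
      | [] => ([] : List Int)
      | d :: t => d :: scanMaxFrom d t) none [] = grp days := by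
  cases days with
  | nil => simp [rleLoop, grp_nil]
  | cons d t =>
    show rleLoop (d :: scanMaxFrom d t) none [] = grp (d :: t)
    rw [rleLoop, show ([] : List Int) ++ [1] = [] ++ [(1 : Int)] from rfl,
      rleLoop_scan, grp_cons]
    simp

-- ===== VERDICT (by name: the statement is the Claim_ definition above) =====
theorem solution_spec : Claim_equal_solution := by
  intro progresses speeds _ hpre
  unfold Spec_solution solution solution_alt
  have hdays : (progresses.zip speeds).map (fun item =>
      if PySem.Int.mod (100 - item.1) item.2 = 0 then PySem.Int.floordiv (100 - item.1) item.2
      else PySem.Int.floordiv (100 - item.1) item.2 + 1) =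
      (progresses.zip speeds).map daysB := by
    apply List.map_congr_left
    intro item hmem
    have hs : item.2 ≠ 0 := by
      unfold Pre_solution at hpre
      rw [List.all_eq_true] at hpre
      simpa using hpre item hmem
    have := ceil_eq (100 - item.1) item.2 hs
    simpa [daysB, show -(100 - item.1) = item.1 - 100 by ring] using this
  rw [aOuter_eq, List.drop_zero, hdays, ← alt_eq_grp]
  congr 1
  cases hz : progresses.zip speeds with
  | nil => rfl
  | cons hd t =>
    obtain ⟨p, s⟩ := hd
    simp only [relLoop, List.map_cons, relLoop_some, daysB]
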